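-- pv_equiv track=rewrite | github.com/Alexerson/adventofcode | src/y2019/day17.py | convert_stream_into_image
-- ===== SOURCE A (Python) =====
-- def convert_stream_into_image(stream):
--     image = {}
--     position = [0, 0]
--
--     for pixel in stream:
--         if pixel == '\n':
--             position[0] = 0
--             position[1] += 1
--         else:
--             image[tuple(position)] = pixel
--             position[0] += 1
--
--     return image
-- ===== SOURCE B (Python) =====
-- def convert_stream_into_image(stream):
--     # Split the stream on newline markers into rows first, then assign
--     # coordinates with nested enumerate passes (no mutable cursor).
--     rows, current = [], []
--     for pixel in stream:
--         if pixel == '\n':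
--             rows.append(current)
--             current = []
--         else:
--             current.append(pixel)
--     rows.append(current)
--     return {(x, y): pixel
--             for y, row in enumerate(rows)
--             for x, pixel in enumerate(row)}
-- ===== Notes on version B (the rewrite author's own statement) =====
-- stated objective: idiomatic
-- what changed: Replaces the single stateful pass with a mutable [x,y] cursor by a split-into-rows pass followed by a nested enumerate comprehension that derives coordinates from indices.
import Mathlib
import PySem

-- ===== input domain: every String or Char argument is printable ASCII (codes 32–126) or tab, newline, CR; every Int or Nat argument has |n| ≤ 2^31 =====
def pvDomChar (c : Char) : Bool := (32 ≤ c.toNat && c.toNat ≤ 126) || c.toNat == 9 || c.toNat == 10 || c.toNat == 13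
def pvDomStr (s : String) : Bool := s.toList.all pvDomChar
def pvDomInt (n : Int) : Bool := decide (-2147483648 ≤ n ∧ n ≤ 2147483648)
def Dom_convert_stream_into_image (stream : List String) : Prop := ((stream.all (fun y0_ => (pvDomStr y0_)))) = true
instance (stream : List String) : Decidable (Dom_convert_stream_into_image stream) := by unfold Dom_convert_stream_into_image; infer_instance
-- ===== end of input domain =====

-- B replaces A's single stateful pass with a mutable cursor by a split-into-rows
-- pass followed by nested enumerate passes (idiomatic decomposition; same cost).


-- ===== PORT A =====
-- image is a Python dict keyed by (x, y); position the mutable [x, y] cursor.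
def convert_stream_into_image (stream : List String) : List (Int × Int × String) :=
  let fin := stream.foldl
    (fun (acc : PySem.Dict (Int × Int) String × Int × Int) pixel =>
      if pixel = "\n" then (acc.1, 0, acc.2.2 + 1)
      else (acc.1.insert (acc.2.1, acc.2.2) pixel, acc.2.1 + 1, acc.2.2))
    (PySem.Dict.empty, 0, 0)
  fin.1.items.map (fun p => (p.1.1, p.1.2, p.2))

-- ===== PORT B =====
-- inner 'for x, pixel in enumerate(row)' pass of the comprehension
def pvRowIns (y : Int) (img : PySem.Dict (Int × Int) String) (row : List String) :
    PySem.Dict (Int × Int) String :=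
  (PySem.List.enumerate row).foldl (fun img xp => img.insert (xp.1, y) xp.2) img

def convert_stream_into_image_alt (stream : List String) : List (Int × Int × String) :=
  let st := stream.foldl
    (fun (acc : List (List String) × List String) pixel =>
      if pixel = "\n" then (acc.1 ++ [acc.2], ([] : List String))
      else (acc.1, acc.2 ++ [pixel]))
    ([], [])
  let rows := st.1 ++ [st.2]
  let image := (PySem.List.enumerate rows).foldl
    (fun img yrow => pvRowIns yrow.1 img yrow.2) PySem.Dict.empty
  image.items.map (fun p => (p.1.1, p.1.2, p.2))

-- ===== PRECONDITION & SPEC =====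
def Spec_convert_stream_into_image (stream : List String) (out : List (Int × Int × String)) : Prop := out = convert_stream_into_image_alt stream
instance (stream : List String) (out : List (Int × Int × String)) : Decidable (Spec_convert_stream_into_image stream out) := by unfold Spec_convert_stream_into_image; infer_instance

-- ===== CLAIM (what is proved, stated in full; the proofs are below) =====
def Claim_equal_convert_stream_into_image : Prop := ∀ (stream : List String), Dom_convert_stream_into_image stream → Spec_convert_stream_into_image stream (convert_stream_into_image stream)

-- ===== LEMMAS AND PROOFS =====

-- the dict B builds from a finished list of rows
def pvBuild (rows : List (List String)) : PySem.Dict (Int × Int) String :=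
  (PySem.List.enumerate rows).foldl
    (fun img yrow => pvRowIns yrow.1 img yrow.2) PySem.Dict.empty

lemma pvRowIns_nil (y : Int) (img : PySem.Dict (Int × Int) String) :
    pvRowIns y img [] = img := by
  simp [pvRowIns, PySem.List.enumerate]

lemma pvRowIns_append (y : Int) (img : PySem.Dict (Int × Int) String)
    (row : List String) (p : String) :
    pvRowIns y img (row ++ [p]) =
      (pvRowIns y img row).insert ((row.length : Int), y) p := by
  simp [pvRowIns, PySem.List.enumerate_append, List.foldl_append, PySem.List.enumerate]

lemma pvBuild_append (rows : List (List String)) (r : List String) :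
    pvBuild (rows ++ [r]) = pvRowIns (rows.length : Int) (pvBuild rows) r := by
  simp [pvBuild, PySem.List.enumerate_append, List.foldl_append, PySem.List.enumerate]

-- loop invariant: A's fold run from B's partially-split state yields B's built dict
lemma pvMain (stream : List String) :
    ∀ (rows : List (List String)) (cur : List String),
    (stream.foldl
      (fun (acc : PySem.Dict (Int × Int) String × Int × Int) pixel =>
        if pixel = "\n" then (acc.1, 0, acc.2.2 + 1)
        else (acc.1.insert (acc.2.1, acc.2.2) pixel, acc.2.1 + 1, acc.2.2))
      (pvBuild (rows ++ [cur]), (cur.length : Int), (rows.length : Int))).1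
    = pvBuild
        ((stream.foldl
          (fun (acc : List (List String) × List String) pixel =>
            if pixel = "\n" then (acc.1 ++ [acc.2], ([] : List String))
            else (acc.1, acc.2 ++ [pixel]))
          (rows, cur)).1
        ++ [(stream.foldl
          (fun (acc : List (List String) × List String) pixel =>
            if pixel = "\n" then (acc.1 ++ [acc.2], ([] : List String))
            else (acc.1, acc.2 ++ [pixel]))
          (rows, cur)).2]) := by
  induction stream with
  | nil => intro rows cur; simp
  | cons pixel rest ih =>
    intro rows cur
    by_cases h : pixel = "\n"
    · simp only [List.foldl_cons, if_pos h]
      have hb : pvBuild ((rows ++ [cur]) ++ [([] : List String)])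
          = pvBuild (rows ++ [cur]) := by
        rw [pvBuild_append, pvRowIns_nil]
      have := ih (rows ++ [cur]) []
      rw [hb] at this
      simpa using this
    · simp only [List.foldl_cons, if_neg h]
      have hb : pvBuild (rows ++ [cur ++ [pixel]])
          = (pvBuild (rows ++ [cur])).insert ((cur.length : Int), (rows.length : Int)) pixel := by
        rw [pvBuild_append, pvBuild_append, pvRowIns_append]
      have := ih rows (cur ++ [pixel])
      rw [hb] at this
      simpa using this

-- ===== VERDICT (by name: the statement is the Claim_ definition above) =====
theorem convert_stream_into_image_spec : Claim_equal_convert_stream_into_image := by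
  intro stream _
  unfold Spec_convert_stream_into_image convert_stream_into_image convert_stream_into_image_alt
  have hm := pvMain stream [] []
  have hb : pvBuild (([] : List (List String)) ++ [[]]) = PySem.Dict.empty := by
    rw [pvBuild_append, pvRowIns_nil]
    simp [pvBuild, PySem.List.enumerate]
  rw [hb] at hm
  simp only [List.length_nil, Nat.cast_zero] at hm
  simpa [pvBuild] using
    congrArg (fun d : PySem.Dict (Int × Int) String =>
      d.items.map (fun p => (p.1.1, p.1.2, p.2))) hm
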